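-- pv_equiv track=rewrite | github.com/LucasPin45/monitorzanatta | core/utils/formatters.py | _verificar_relator_adversario
-- ===== SOURCE A (Python) =====
-- from typing import Tuple, Optional
--
-- PARTIDOS_RELATOR_ADVERSARIO = {"PT", "PV", "PSB", "PCDOB", "PSOL", "REDE"}
--
-- def _verificar_relator_adversario(relator_str: str) -> Tuple[str, bool]:
--     """
--     Verifica se o relator é de partido adversário.
--     Retorna: (texto_relator_formatado, is_adversario)
--     """
--     if not relator_str or not str(relator_str).strip() or str(relator_str).strip() in ('-', '—', 'nan'):
--         return "Sem relator designado", False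
--
--     relator = str(relator_str).strip()
--     relator_upper = relator.upper()
--
--     for partido in PARTIDOS_RELATOR_ADVERSARIO:
--         if f"({partido}/" in relator_upper or f"({partido}-" in relator_upper or f"/{partido})" in relator_upper:
--             return relator, True
--         if partido == "PCDOB" and ("(PC DO B" in relator_upper or "/PC DO B" in relator_upper):
--             return relator, True
--
--     return relator, False
-- ===== SOURCE B (Python) =====
-- PARTIDOS_RELATOR_ADVERSARIO = {"PT", "PV", "PSB", "PCDOB", "PSOL", "REDE"}
--
--
-- def _token(s, stops):
--     """Maximal prefix of s free of stop chars; returns (token, whether a stop char was reached)."""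
--     for j, ch in enumerate(s):
--         if ch in stops:
--             return s[:j], True
--     return s, False
--
--
-- def _marker_follows(c, rest):
--     """c is the delimiter '(' or '/'; rest the text after it: does an adversarial-party marker start here?"""
--     if rest.startswith("PC DO B"):
--         return True
--     if c == '(':
--         tok, stopped = _token(rest, '/-')
--     else:
--         tok, stopped = _token(rest, ')')
--     return stopped and tok in PARTIDOS_RELATOR_ADVERSARIO
--
--
-- def _verificar_relator_adversario(relator_str):
--     if not relator_str or not str(relator_str).strip() or str(relator_str).strip() in ('-', '—', 'nan'):
--         return "Sem relator designado", False
--     relator = str(relator_str).strip()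
--     u = relator.upper()
--     hit = any(_marker_follows(u[i], u[i + 1:]) for i in range(len(u)) if u[i] in '(/')
--     return relator, hit
-- ===== Notes on version B (the rewrite author's own statement) =====
-- stated objective: alternative
-- what changed: A searches the whole string once per precomputed party marker substring; B makes a single left-to-right scan that, at each opening-parenthesis or slash delimiter, parses the following token up to its closing mark (or recognises the spaced PC DO B literal) and tests that token against the party set.
import Mathlib
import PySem

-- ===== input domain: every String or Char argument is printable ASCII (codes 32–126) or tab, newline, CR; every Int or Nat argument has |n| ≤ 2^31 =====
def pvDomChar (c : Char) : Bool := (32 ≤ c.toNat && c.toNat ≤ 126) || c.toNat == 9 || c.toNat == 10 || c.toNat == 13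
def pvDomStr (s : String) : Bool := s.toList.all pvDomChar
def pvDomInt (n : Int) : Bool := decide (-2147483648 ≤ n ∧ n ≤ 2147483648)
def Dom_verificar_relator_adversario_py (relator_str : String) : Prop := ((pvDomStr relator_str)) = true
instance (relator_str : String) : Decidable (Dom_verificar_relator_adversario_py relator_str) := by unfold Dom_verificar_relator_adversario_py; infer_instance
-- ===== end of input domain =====

-- B replaces A's per-party substring searches by a single left-to-right scan that, at each
-- '(' or '/' delimiter, parses the token up to the closing mark and tests it against the
-- party set (objective: alternative algorithm; same behaviour).

-- ===== PORT A =====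
def pvPartidosA : List String := ["PCDOB", "PT", "PV", "PSB", "PSOL", "REDE"]
  -- Python set iteration order; the loop's result does not depend on the order.

def pvLoopA (relator relator_upper : String) : List String → String × Bool
  | [] => (relator, false)
  | partido :: rest =>
    if PySem.Str.isIn ("(" ++ partido ++ "/") relator_upper
        || PySem.Str.isIn ("(" ++ partido ++ "-") relator_upper
        || PySem.Str.isIn ("/" ++ partido ++ ")") relator_upper then
      (relator, true)
    else if partido == "PCDOB"
        && (PySem.Str.isIn "(PC DO B" relator_upper || PySem.Str.isIn "/PC DO B" relator_upper) then
      (relator, true)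
    else
      pvLoopA relator relator_upper rest

def verificar_relator_adversario_py (relator_str : String) : String × Bool :=
  if relator_str == "" || PySem.Str.strip relator_str == ""
      || PySem.Str.strip relator_str == "-" || PySem.Str.strip relator_str == "—"
      || PySem.Str.strip relator_str == "nan" then
    ("Sem relator designado", false)
  else
    let relator := PySem.Str.strip relator_str
    let relator_upper := PySem.Str.upper relator
    pvLoopA relator relator_upper pvPartidosA

-- ===== PORT B =====
def pvPartiesB : List (List Char) :=
  [['P','T'], ['P','V'], ['P','S','B'], ['P','C','D','O','B'], ['P','S','O','L'], ['R','E','D','E']]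

def pvPC : List Char := ['P','C',' ','D','O',' ','B']

-- _token: the maximal stop-free prefix, plus whether a stop char was reached
def pvToken (stops : List Char) : List Char → List Char × Bool
  | [] => ([], false)
  | ch :: s =>
    if stops.contains ch then ([], true)
    else (ch :: (pvToken stops s).1, (pvToken stops s).2)

-- _marker_follows: c is the delimiter '(' or '/', rest the text after it
def pvMarkerFollows (c : Char) (rest : List Char) : Bool :=
  if PySem.Chars.startswith rest pvPC then true
  else
    let r := if c = '(' then pvToken ['/', '-'] rest else pvToken [')'] rest
    r.2 && pvPartiesB.contains r.1

-- the filtered `any` over character positions, as recursion on the suffixes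
def pvScan : List Char → Bool
  | [] => false
  | c :: rest => ((c = '(' || c = '/') && pvMarkerFollows c rest) || pvScan rest

def verificar_relator_adversario_py_alt (relator_str : String) : String × Bool :=
  if relator_str == "" || PySem.Str.strip relator_str == ""
      || PySem.Str.strip relator_str == "-" || PySem.Str.strip relator_str == "—"
      || PySem.Str.strip relator_str == "nan" then
    ("Sem relator designado", false)
  else
    let relator := PySem.Str.strip relator_str
    let u := PySem.Str.upper relator
    (relator, pvScan u.toList)

-- ===== PRECONDITION & SPEC =====
def Spec_verificar_relator_adversario_py (relator_str : String) (out : String × Bool) : Prop := out = verificar_relator_adversario_py_alt relator_str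
instance (relator_str : String) (out : String × Bool) : Decidable (Spec_verificar_relator_adversario_py relator_str out) := by unfold Spec_verificar_relator_adversario_py; infer_instance

-- ===== CLAIM (what is proved, stated in full; the proofs are below) =====
def Claim_equal_verificar_relator_adversario_py : Prop := ∀ (relator_str : String), Dom_verificar_relator_adversario_py relator_str → Spec_verificar_relator_adversario_py relator_str (verificar_relator_adversario_py relator_str)

-- ===== LEMMAS AND PROOFS =====

-- A's per-party condition, pulled out of the loop
def pvCondA (p : String) (ru : String) : Bool :=
  PySem.Str.isIn ("(" ++ p ++ "/") ru || PySem.Str.isIn ("(" ++ p ++ "-") ru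
    || PySem.Str.isIn ("/" ++ p ++ ")") ru
    || (p == "PCDOB" && (PySem.Str.isIn "(PC DO B" ru || PySem.Str.isIn "/PC DO B" ru))

theorem pvLoopA_eq (relator ru : String) (ps : List String) :
    pvLoopA relator ru ps = (relator, ps.any (fun p => pvCondA p ru)) := by
  induction ps with
  | nil => rfl
  | cons p ps ih =>
    simp only [pvLoopA, ih, List.any_cons]
    split_ifs with h1 h2
    · have hc : pvCondA p ru = true := by
        simp only [Bool.or_eq_true] at h1
        simp only [pvCondA, Bool.or_eq_true]
        tauto
      simp [hc]
    · have hc : pvCondA p ru = true := by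
        simp only [Bool.and_eq_true, Bool.or_eq_true, beq_iff_eq] at h2
        simp only [pvCondA, Bool.or_eq_true, Bool.and_eq_true, beq_iff_eq]
        tauto
      simp [hc]
    · have hc : pvCondA p ru = false := by
        rw [Bool.eq_false_iff]
        intro hcon
        simp only [Bool.or_eq_true, not_or] at h1
        simp only [Bool.and_eq_true, Bool.or_eq_true, beq_iff_eq, not_and_or, not_or] at h2
        simp only [pvCondA, Bool.or_eq_true, Bool.and_eq_true, beq_iff_eq] at hcon
        tauto
      simp [hc]

theorem pvToken_complete {stops : List Char} {p : List Char} (hp : ∀ c ∈ p, c ∉ stops)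
    (d : Char) (hd : d ∈ stops) (r : List Char) :
    pvToken stops (p ++ d :: r) = (p, true) := by
  induction p with
  | nil =>
    rw [List.nil_append, pvToken, if_pos (List.contains_iff_mem.mpr hd)]
  | cons c p ih =>
    have hc : ¬ stops.contains c = true := by
      simpa [List.contains_iff_mem] using hp c (by simp)
    rw [List.cons_append, pvToken, if_neg hc,
      ih (fun x hx => hp x (by simp [hx]))]

theorem pvToken_sound {stops : List Char} :
    ∀ {s t : List Char}, pvToken stops s = (t, true) → ∃ d r, d ∈ stops ∧ s = t ++ d :: r := by
  intro s
  induction s with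
  | nil => intro t h; rw [pvToken, Prod.mk.injEq] at h; simp at h
  | cons c s ih =>
    intro t h
    rw [pvToken] at h
    by_cases hc : stops.contains c = true
    · rw [if_pos hc, Prod.mk.injEq] at h
      exact ⟨c, s, List.contains_iff_mem.mp hc, by rw [← h.1]; rfl⟩
    · rw [if_neg hc, Prod.mk.injEq] at h
      obtain ⟨h1, h2⟩ := h
      obtain ⟨d, r, hd, hs⟩ := ih (t := (pvToken stops s).1)
        (by rw [Prod.ext_iff]; exact ⟨rfl, h2⟩)
      refine ⟨d, r, hd, ?_⟩
      rw [← h1]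
      exact congrArg (c :: ·) hs

theorem pvParties_stopfree : ∀ p ∈ pvPartiesB, ∀ c ∈ p,
    c ∉ (['/', '-'] : List Char) ∧ c ∉ ([')'] : List Char) := by
  intro p hp c hc
  fin_cases hp <;> fin_cases hc <;> exact ⟨by decide, by decide⟩

-- markerFollows: introduction forms
theorem pvMF_of_pc {c : Char} {rest : List Char} (h : pvPC <+: rest) :
    pvMarkerFollows c rest = true := by
  simp [pvMarkerFollows, (PySem.Chars.startswith_iff rest pvPC).mpr h]

theorem pvMF_open {p : List Char} (hp : p ∈ pvPartiesB) {d : Char}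
    (hd : d ∈ (['/', '-'] : List Char)) {rest : List Char} (h : (p ++ [d]) <+: rest) :
    pvMarkerFollows '(' rest = true := by
  obtain ⟨r, hr⟩ := h
  rw [List.append_assoc, List.singleton_append] at hr
  subst hr
  simp only [pvMarkerFollows]
  split
  · rfl
  · simp [pvToken_complete (fun c hc => (pvParties_stopfree p hp c hc).1) d hd, hp]

theorem pvMF_slash {p : List Char} (hp : p ∈ pvPartiesB)
    {rest : List Char} (h : (p ++ [')']) <+: rest) : pvMarkerFollows '/' rest = true := by
  obtain ⟨r, hr⟩ := h
  rw [List.append_assoc, List.singleton_append] at hr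
  subst hr
  simp only [pvMarkerFollows]
  split
  · rfl
  · simp [pvToken_complete (fun c hc => (pvParties_stopfree p hp c hc).2) ')' (by simp), hp]

-- markerFollows: elimination
theorem pvMF_elim {c : Char} {rest : List Char} (h : pvMarkerFollows c rest = true) :
    pvPC <+: rest ∨
      (c = '(' ∧ ∃ p ∈ pvPartiesB, ∃ d ∈ (['/', '-'] : List Char), (p ++ [d]) <+: rest) ∨
      (c ≠ '(' ∧ ∃ p ∈ pvPartiesB, (p ++ [')']) <+: rest) := by
  by_cases hpc : PySem.Chars.startswith rest pvPC = true
  · exact Or.inl ((PySem.Chars.startswith_iff rest pvPC).mp hpc)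
  · right
    by_cases hc : c = '('
    · left
      subst hc
      rcases htk : pvToken ['/', '-'] rest with ⟨t, b⟩
      simp only [pvMarkerFollows, hpc, htk, Bool.false_eq_true, if_false, if_true, Bool.and_eq_true, List.contains_iff_mem] at h
      obtain ⟨d, r, hd, hs⟩ := pvToken_sound (htk.trans (by rw [h.1]))
      exact ⟨rfl, t, h.2, d, hd, r, by rw [hs]; simp⟩
    · right
      rcases htk : pvToken [')'] rest with ⟨t, b⟩
      simp only [pvMarkerFollows, hpc, hc, htk, Bool.false_eq_true, if_false,
        Bool.and_eq_true, List.contains_iff_mem] at h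
      obtain ⟨d, r, hd, hs⟩ := pvToken_sound (htk.trans (by rw [h.1]))
      simp only [List.mem_cons, List.not_mem_nil, or_false] at hd
      exact ⟨hc, t, h.2, r, by rw [hs, hd]; simp⟩

-- scan: a hit at any suffix makes the scan true
theorem pvScan_suffix {l₂ l₁ : List Char} (h : l₂ <:+ l₁) (hs : pvScan l₂ = true) :
    pvScan l₁ = true := by
  induction l₁ with
  | nil => rw [List.suffix_nil.mp h] at hs; exact hs
  | cons c rest ih =>
    rcases List.suffix_cons_iff.mp h with h | h
    · rw [h] at hs; exact hs
    · simp [pvScan, ih h]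

theorem pvScan_of_marker {c : Char} (hc : c = '(' ∨ c = '/') {m l : List Char}
    (hinf : (c :: m) <:+: l) (hmf : ∀ rest, m <+: rest → pvMarkerFollows c rest = true) :
    pvScan l = true := by
  obtain ⟨s, t, hst⟩ := hinf
  have hsuf : (c :: (m ++ t)) <:+ l := ⟨s, by rw [← hst]; simp⟩
  refine pvScan_suffix hsuf ?_
  have hmt : pvMarkerFollows c (m ++ t) = true := hmf _ ⟨t, rfl⟩
  rcases hc with rfl | rfl <;> simp [pvScan, hmt]

theorem pvScan_of_open {p : List Char} (hp : p ∈ pvPartiesB) {d : Char}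
    (hd : d ∈ (['/', '-'] : List Char)) {l : List Char}
    (h : ('(' :: (p ++ [d])) <:+: l) : pvScan l = true :=
  pvScan_of_marker (Or.inl rfl) h (fun _ hr => pvMF_open hp hd hr)

theorem pvScan_of_slash {p : List Char} (hp : p ∈ pvPartiesB) {l : List Char}
    (h : ('/' :: (p ++ [')'])) <:+: l) : pvScan l = true :=
  pvScan_of_marker (Or.inr rfl) h (fun _ hr => pvMF_slash hp hr)

theorem pvScan_of_pc {c : Char} (hc : c = '(' ∨ c = '/') {l : List Char}
    (h : (c :: pvPC) <:+: l) : pvScan l = true :=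
  pvScan_of_marker hc h (fun _ hr => pvMF_of_pc hr)

-- scan: elimination to a hit at some suffix
theorem pvScan_elim : ∀ {l : List Char}, pvScan l = true →
    ∃ c rest, (c :: rest) <:+ l ∧ (c = '(' ∨ c = '/') ∧ pvMarkerFollows c rest = true := by
  intro l
  induction l with
  | nil => intro h; simp [pvScan] at h
  | cons c rest ih =>
    intro h
    simp only [pvScan, Bool.or_eq_true, Bool.and_eq_true, decide_eq_true_eq] at h
    rcases h with h | h
    · exact ⟨c, rest, List.suffix_refl _, h.1, h.2⟩
    · obtain ⟨c', rest', hsuf, hc', hm⟩ := ih h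
      exact ⟨c', rest', hsuf.trans (List.suffix_cons c rest), hc', hm⟩

theorem pv_infix_helper {m x l : List Char} (h1 : m <+: x) (h2 : x <:+ l) : m <:+: l :=
  h1.isInfix.trans h2.isInfix

-- the bridge: A's big-or over the parties equals B's scan
theorem pvKey (ru : String) :
    pvPartidosA.any (fun p => pvCondA p ru) = pvScan ru.toList := by
  rw [Bool.eq_iff_iff, List.any_eq_true]
  constructor
  · rintro ⟨p, hp, hcond⟩
    simp only [pvPartidosA, List.mem_cons, List.not_mem_nil, or_false] at hp
    rcases hp with rfl | rfl | rfl | rfl | rfl | rfl <;>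
      simp only [pvCondA, Bool.or_eq_true, Bool.and_eq_true, beq_iff_eq,
        PySem.Str.isIn_iff_infix] at hcond
    · rcases hcond with ((h | h) | h) | ⟨-, h | h⟩
      · exact pvScan_of_open (p := ['P','C','D','O','B']) (by decide) (d := '/') (by decide) h
      · exact pvScan_of_open (p := ['P','C','D','O','B']) (by decide) (d := '-') (by decide) h
      · exact pvScan_of_slash (p := ['P','C','D','O','B']) (by decide) h
      · exact pvScan_of_pc (c := '(') (Or.inl rfl) h
      · exact pvScan_of_pc (c := '/') (Or.inr rfl) h
    · rcases hcond with ((h | h) | h) | ⟨h, -⟩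
      · exact pvScan_of_open (p := ['P','T']) (by decide) (d := '/') (by decide) h
      · exact pvScan_of_open (p := ['P','T']) (by decide) (d := '-') (by decide) h
      · exact pvScan_of_slash (p := ['P','T']) (by decide) h
      · exact absurd h (by decide)
    · rcases hcond with ((h | h) | h) | ⟨h, -⟩
      · exact pvScan_of_open (p := ['P','V']) (by decide) (d := '/') (by decide) h
      · exact pvScan_of_open (p := ['P','V']) (by decide) (d := '-') (by decide) h
      · exact pvScan_of_slash (p := ['P','V']) (by decide) h
      · exact absurd h (by decide)
    · rcases hcond with ((h | h) | h) | ⟨h, -⟩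
      · exact pvScan_of_open (p := ['P','S','B']) (by decide) (d := '/') (by decide) h
      · exact pvScan_of_open (p := ['P','S','B']) (by decide) (d := '-') (by decide) h
      · exact pvScan_of_slash (p := ['P','S','B']) (by decide) h
      · exact absurd h (by decide)
    · rcases hcond with ((h | h) | h) | ⟨h, -⟩
      · exact pvScan_of_open (p := ['P','S','O','L']) (by decide) (d := '/') (by decide) h
      · exact pvScan_of_open (p := ['P','S','O','L']) (by decide) (d := '-') (by decide) h
      · exact pvScan_of_slash (p := ['P','S','O','L']) (by decide) h
      · exact absurd h (by decide)
    · rcases hcond with ((h | h) | h) | ⟨h, -⟩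
      · exact pvScan_of_open (p := ['R','E','D','E']) (by decide) (d := '/') (by decide) h
      · exact pvScan_of_open (p := ['R','E','D','E']) (by decide) (d := '-') (by decide) h
      · exact pvScan_of_slash (p := ['R','E','D','E']) (by decide) h
      · exact absurd h (by decide)
  · intro hs
    obtain ⟨c, rest, hsuf, hc, hmf⟩ := pvScan_elim hs
    rcases pvMF_elim hmf with hpcp | ⟨rfl, p, hp, d, hd, hpre⟩ | ⟨hne, p, hp, hpre⟩
    · -- "PC DO B" right after the delimiter
      refine ⟨"PCDOB", by decide, ?_⟩
      have hinf : (c :: pvPC) <:+: ru.toList :=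
        pv_infix_helper (List.cons_prefix_cons.mpr ⟨rfl, hpcp⟩) hsuf
      rcases hc with rfl | rfl
      · simp only [pvCondA, Bool.or_eq_true, Bool.and_eq_true, beq_iff_eq,
          PySem.Str.isIn_iff_infix]
        exact Or.inr ⟨trivial, Or.inl hinf⟩
      · simp only [pvCondA, Bool.or_eq_true, Bool.and_eq_true, beq_iff_eq,
          PySem.Str.isIn_iff_infix]
        exact Or.inr ⟨trivial, Or.inr hinf⟩
    · -- '(' ++ party ++ '/' or '-'
      have hinf : ('(' :: (p ++ [d])) <:+: ru.toList :=
        pv_infix_helper (List.cons_prefix_cons.mpr ⟨rfl, hpre⟩) hsuf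
      simp only [pvPartiesB, List.mem_cons, List.not_mem_nil, or_false] at hp
      simp only [List.mem_cons, List.not_mem_nil, or_false] at hd
      rcases hp with rfl | rfl | rfl | rfl | rfl | rfl <;> rcases hd with rfl | rfl <;>
        [exact ⟨"PT", by decide, by simp only [pvCondA, Bool.or_eq_true,
            PySem.Str.isIn_iff_infix]; exact Or.inl (Or.inl (Or.inl hinf))⟩;
         exact ⟨"PT", by decide, by simp only [pvCondA, Bool.or_eq_true,
            PySem.Str.isIn_iff_infix]; exact Or.inl (Or.inl (Or.inr hinf))⟩;
         exact ⟨"PV", by decide, by simp only [pvCondA, Bool.or_eq_true,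
            PySem.Str.isIn_iff_infix]; exact Or.inl (Or.inl (Or.inl hinf))⟩;
         exact ⟨"PV", by decide, by simp only [pvCondA, Bool.or_eq_true,
            PySem.Str.isIn_iff_infix]; exact Or.inl (Or.inl (Or.inr hinf))⟩;
         exact ⟨"PSB", by decide, by simp only [pvCondA, Bool.or_eq_true,
            PySem.Str.isIn_iff_infix]; exact Or.inl (Or.inl (Or.inl hinf))⟩;
         exact ⟨"PSB", by decide, by simp only [pvCondA, Bool.or_eq_true,
            PySem.Str.isIn_iff_infix]; exact Or.inl (Or.inl (Or.inr hinf))⟩;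
         exact ⟨"PCDOB", by decide, by simp only [pvCondA, Bool.or_eq_true,
            PySem.Str.isIn_iff_infix]; exact Or.inl (Or.inl (Or.inl hinf))⟩;
         exact ⟨"PCDOB", by decide, by simp only [pvCondA, Bool.or_eq_true,
            PySem.Str.isIn_iff_infix]; exact Or.inl (Or.inl (Or.inr hinf))⟩;
         exact ⟨"PSOL", by decide, by simp only [pvCondA, Bool.or_eq_true,
            PySem.Str.isIn_iff_infix]; exact Or.inl (Or.inl (Or.inl hinf))⟩;
         exact ⟨"PSOL", by decide, by simp only [pvCondA, Bool.or_eq_true,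
            PySem.Str.isIn_iff_infix]; exact Or.inl (Or.inl (Or.inr hinf))⟩;
         exact ⟨"REDE", by decide, by simp only [pvCondA, Bool.or_eq_true,
            PySem.Str.isIn_iff_infix]; exact Or.inl (Or.inl (Or.inl hinf))⟩;
         exact ⟨"REDE", by decide, by simp only [pvCondA, Bool.or_eq_true,
            PySem.Str.isIn_iff_infix]; exact Or.inl (Or.inl (Or.inr hinf))⟩]
    · -- '/' ++ party ++ ')'
      have hc' : c = '/' := hc.resolve_left hne
      subst hc'
      have hinf : ('/' :: (p ++ [')'])) <:+: ru.toList :=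
        pv_infix_helper (List.cons_prefix_cons.mpr ⟨rfl, hpre⟩) hsuf
      simp only [pvPartiesB, List.mem_cons, List.not_mem_nil, or_false] at hp
      rcases hp with rfl | rfl | rfl | rfl | rfl | rfl <;>
        [exact ⟨"PT", by decide, by simp only [pvCondA, Bool.or_eq_true,
            PySem.Str.isIn_iff_infix]; exact Or.inl (Or.inr hinf)⟩;
         exact ⟨"PV", by decide, by simp only [pvCondA, Bool.or_eq_true,
            PySem.Str.isIn_iff_infix]; exact Or.inl (Or.inr hinf)⟩;
         exact ⟨"PSB", by decide, by simp only [pvCondA, Bool.or_eq_true,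
            PySem.Str.isIn_iff_infix]; exact Or.inl (Or.inr hinf)⟩;
         exact ⟨"PCDOB", by decide, by simp only [pvCondA, Bool.or_eq_true,
            PySem.Str.isIn_iff_infix]; exact Or.inl (Or.inr hinf)⟩;
         exact ⟨"PSOL", by decide, by simp only [pvCondA, Bool.or_eq_true,
            PySem.Str.isIn_iff_infix]; exact Or.inl (Or.inr hinf)⟩;
         exact ⟨"REDE", by decide, by simp only [pvCondA, Bool.or_eq_true,
            PySem.Str.isIn_iff_infix]; exact Or.inl (Or.inr hinf)⟩]

-- ===== VERDICT (by name: the statement is the Claim_ definition above) =====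
theorem verificar_relator_adversario_py_spec : Claim_equal_verificar_relator_adversario_py := by
  intro relator_str _
  unfold Spec_verificar_relator_adversario_py verificar_relator_adversario_py verificar_relator_adversario_py_alt
  split
  · rfl
  · rw [pvLoopA_eq, pvKey]
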